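-- pv_equiv track=rewrite | github.com/gloria-rizzato/Identification-and-characterization-of-serious-games-in-Google-Play-store | Project-Part2/Functions/study_type.py | type_study
-- ===== SOURCE A (Python) =====
-- def type_study (common_sr, common_os, common_ma, common_rct):
--     len_sr = len(common_sr)
--     len_os = len(common_os)
--     len_ma = len(common_ma)
--     len_rct = len(common_rct)
--     len_list = [len_os, len_rct, len_sr, len_ma]  # from less evidence to more evidence
--     type_paper = ['observational study', 'randomised control trials', 'systematic review',
--                   'meta analysis']  # same order
--
--     m = max(len_list)
--     if m == 0:
--         return 'other'
--     elif m !=0: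
--         MAX = [i for i, j in enumerate(len_list) if j == m]
--         TYPE = type_paper[MAX[-1]]
--         return TYPE
-- ===== SOURCE B (Python) =====
-- def type_study(common_sr, common_os, common_ma, common_rct):
--     # Loop-free decision tree: check candidates from highest-priority (last in A's
--     # order) downward; 'ma' wins any tie, then 'sr', then 'rct', then 'os'.
--     a = len(common_os)
--     b = len(common_rct)
--     c = len(common_sr)
--     d = len(common_ma)
--     if d == 0 and c == 0 and b == 0 and a == 0:
--         return 'other'
--     if d >= c and d >= b and d >= a:
--         return 'meta analysis'
--     if c >= b and c >= a:
--         return 'systematic review'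
--     if b >= a:
--         return 'randomised control trials'
--     return 'observational study'
-- ===== Notes on version B (the rewrite author's own statement) =====
-- stated objective: simpler
-- what changed: Replaced A's list-building max()-then-index-comprehension-then-MAX[-1] pipeline with a loop-free decision tree of direct length comparisons checked in descending tie-priority (ma, sr, rct, os), with no intermediate lists at all.
import Mathlib
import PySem

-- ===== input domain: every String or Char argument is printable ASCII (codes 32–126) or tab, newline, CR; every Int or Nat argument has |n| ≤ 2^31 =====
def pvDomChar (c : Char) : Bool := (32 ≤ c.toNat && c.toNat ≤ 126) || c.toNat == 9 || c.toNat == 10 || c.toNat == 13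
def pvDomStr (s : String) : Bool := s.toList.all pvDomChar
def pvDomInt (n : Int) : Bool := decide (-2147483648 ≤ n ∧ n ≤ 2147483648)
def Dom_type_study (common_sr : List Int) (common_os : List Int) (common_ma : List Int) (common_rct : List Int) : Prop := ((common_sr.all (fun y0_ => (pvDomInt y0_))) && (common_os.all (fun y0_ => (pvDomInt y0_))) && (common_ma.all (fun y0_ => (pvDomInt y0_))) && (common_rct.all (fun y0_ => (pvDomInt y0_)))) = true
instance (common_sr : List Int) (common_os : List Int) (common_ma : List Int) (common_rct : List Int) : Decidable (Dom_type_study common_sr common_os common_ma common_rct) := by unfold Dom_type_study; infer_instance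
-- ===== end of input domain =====

-- B replaces A's max+index-comprehension pipeline with a loop-free decision tree of
-- direct length comparisons (objective: simpler).


-- ===== PORT A =====
-- literal port of A: max of the length list, then the comprehension of max-indices, then MAX[-1]
def type_study (common_sr : List Int) (common_os : List Int) (common_ma : List Int) (common_rct : List Int) : String :=
  let len_sr := common_sr.length
  let len_os := common_os.length
  let len_ma := common_ma.length
  let len_rct := common_rct.length
  let len_list : List Nat := [len_os, len_rct, len_sr, len_ma]
  let type_paper : List String := ["observational study", "randomised control trials", "systematic review", "meta analysis"]
  let m := (PySem.List.max? len_list (fun x => x)).getD 0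
  if m == 0 then "other"
  else
    let MAX : List Int := ((PySem.List.enumerate len_list).filter (fun p => p.2 == m)).map (fun p => p.1)
    let TYPE := (PySem.List.pyGet? type_paper ((PySem.List.pyGet? MAX (-1)).getD 0)).getD ""
    TYPE

-- ===== PORT B =====
-- port of B: loop-free decision tree of direct length comparisons, highest tie-priority first
def type_study_alt (common_sr : List Int) (common_os : List Int) (common_ma : List Int) (common_rct : List Int) : String :=
  let a := common_os.length
  let b := common_rct.length
  let c := common_sr.length
  let d := common_ma.length
  if d = 0 ∧ c = 0 ∧ b = 0 ∧ a = 0 then "other"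
  else if d ≥ c ∧ d ≥ b ∧ d ≥ a then "meta analysis"
  else if c ≥ b ∧ c ≥ a then "systematic review"
  else if b ≥ a then "randomised control trials"
  else "observational study"

-- ===== PRECONDITION & SPEC =====
def Spec_type_study (common_sr : List Int) (common_os : List Int) (common_ma : List Int) (common_rct : List Int) (out : String) : Prop := out = type_study_alt common_sr common_os common_ma common_rct
instance (common_sr : List Int) (common_os : List Int) (common_ma : List Int) (common_rct : List Int) (out : String) : Decidable (Spec_type_study common_sr common_os common_ma common_rct out) := by unfold Spec_type_study; infer_instance

-- ===== CLAIM (what is proved, stated in full; the proofs are below) =====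
def Claim_equal_type_study : Prop := ∀ (common_sr : List Int) (common_os : List Int) (common_ma : List Int) (common_rct : List Int), Dom_type_study common_sr common_os common_ma common_rct → Spec_type_study common_sr common_os common_ma common_rct (type_study common_sr common_os common_ma common_rct)

-- ===== LEMMAS AND PROOFS =====

-- ===== VERDICT (by name: the statement is the Claim_ definition above) =====
theorem type_study_spec : Claim_equal_type_study := by
  intro sr os ma rct _
  unfold Spec_type_study type_study type_study_alt
  simp only [PySem.List.max?_id_cons, Option.getD_some, List.foldl, PySem.List.enumerate_cons,
    PySem.List.enumerate_nil, List.filter_cons, List.filter_nil, beq_iff_eq]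
  generalize os.length = a
  generalize rct.length = b
  generalize sr.length = c
  generalize ma.length = d
  split_ifs <;> first | rfl | omega
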